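/- GENERATED by farm/mkstatement.py from design/units.tsv (unit `DGifGetWord.COMPOSITION`) and the Specs of Gif/Spec/*.lean — do not edit.
   THE STATEMENT of the proof unit `DGifGetWord.COMPOSITION`: the function `DGifGetWord` (37 instructions) satisfies its contract,
   GIVEN THE STATEMENTS OF ITS 3 SEGMENTS (`Gif.Spec.DGifGetWord.Seg<k> Lay μ u₀`: what the unit `DGifGetWord.<k>` proves).
   No machine code is walked: `ReachVia.trans` along the segments (the exit assertion of a segment is the entry assertion of
   its successor), an induction on the loop measures. What the names mean: ProgX/Base/Spec/Basic.lean. The theorem to prove: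
   `theorem DGifGetWord_COMPOSITION_ok : Gif.Spec.DGifGetWord_COMPOSITION.Statement`. -/
import Gif.Code
import Gif.Dec.All
import Gif.Labels
import Gif.Spec.Reader
import Gif.Spec.ReaderSegs
namespace Gif.Spec.DGifGetWord_COMPOSITION
open X86 X86.User Asan

/-- The statement of unit `DGifGetWord.COMPOSITION`. -/
def Statement : Prop :=
  ∀ (Lay : Layout) (_hLay : Lay.hi = 0x1000000) (μ : Microarch) (_hμ : UserX.MicroOK μ) (u₀ : State)
    (_h_DGifGetWord_P : Gif.Spec.DGifGetWord.SegP Lay μ u₀)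
    (_h_DGifGetWord_1 : Gif.Spec.DGifGetWord.Seg1 Lay μ u₀)
    (_h_DGifGetWord_E : Gif.Spec.DGifGetWord.SegE Lay μ u₀),
    ∀ (H : Heap) (rest : List Obj) (frames : List (Nat × FrameLayout)) (F : Forest) (R : Rd), Calls Lay μ ProgX.Base.WayInv (ProgX.Base.conv u₀) Gif.L.DGifGetWord.entry (Gif.Spec.DGifGetWord.spec H rest frames F R)

end Gif.Spec.DGifGetWord_COMPOSITION
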